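-- pv_equiv track=rewrite | github.com/nappex/AdventOfCode | 2019/03/AoC_05.py | create_wire
-- ===== SOURCE A (Python) =====
-- def create_wire(wire_directions):
--     directions = {"R": (1, 0),
--                   "U": (0, 1),
--                   "L": (-1, 0),
--                   "D": (0, -1)}
--
--     wire = [[0, 0]]
--
--     for move in wire_directions:
--         x_direct, y_direct = directions[move[0]]
--         x_direct, y_direct = x_direct * move[1], y_direct * move[1]
--         x_move, y_move = wire[-1]
--         wire.append([x_move + x_direct, y_move + y_direct])
--
--     return wire
-- ===== SOURCE B (Python) =====
-- def create_wire(wire_directions):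
--     directions = {"R": (1, 0),
--                   "U": (0, 1),
--                   "L": (-1, 0),
--                   "D": (0, -1)}
--
--     if not wire_directions:
--         return [[0, 0]]
--     (move, dist), rest = wire_directions[0], wire_directions[1:]
--     dx, dy = directions[move]
--     dx, dy = dx * dist, dy * dist
--     # the wire of the remaining moves, translated by the first move's delta
--     return [[0, 0]] + [[x + dx, y + dy] for x, y in create_wire(rest)]
-- ===== Notes on version B (the rewrite author's own statement) =====
-- stated objective: alternative
-- what changed: B is recursive on the move list: it builds the wire of the remaining moves first and then translates every vertex of that recursive result by the first move's delta, instead of A's iterative loop that appends to a mutable list while re-reading its last element (wire[-1]); B trades A's O(n) single pass for an O(n^2) translate-the-suffix recursion.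
import Mathlib
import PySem

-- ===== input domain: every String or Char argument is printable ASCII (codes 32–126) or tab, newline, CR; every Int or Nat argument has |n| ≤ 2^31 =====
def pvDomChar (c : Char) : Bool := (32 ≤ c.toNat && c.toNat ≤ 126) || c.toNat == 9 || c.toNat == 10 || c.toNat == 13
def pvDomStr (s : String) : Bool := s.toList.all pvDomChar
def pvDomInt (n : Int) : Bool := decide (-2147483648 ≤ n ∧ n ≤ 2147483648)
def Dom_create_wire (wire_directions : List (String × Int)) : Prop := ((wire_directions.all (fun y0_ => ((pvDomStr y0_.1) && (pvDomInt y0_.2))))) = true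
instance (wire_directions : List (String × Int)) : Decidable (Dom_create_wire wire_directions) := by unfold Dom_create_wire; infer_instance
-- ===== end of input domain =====

-- B rebuilds the wire recursively (wire of the tail, translated by the first move's delta)
-- instead of A's iterative append loop reading wire[-1]; an alternative decomposition, not faster.


-- ===== PORT A =====
-- the literal dict from A (shared constant; both Pythons write the same literal)
def pvDirections : PySem.Dict String (Int × Int) :=
  ((((PySem.Dict.empty.insert "R" ((1 : Int), (0 : Int))).insert "U" (0, 1)).insert
      "L" (-1, 0)).insert "D" (0, -1))

-- one iteration of A's for-loop body (KeyError / destructuring are unreachable inside Pre_;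
-- the getD defaults are totality guards only)
def pvStepA (wire : List (List Int)) (move : String × Int) : List (List Int) :=
  let d := (pvDirections.get? move.1).getD (0, 0)
  let x_direct := d.1 * move.2
  let y_direct := d.2 * move.2
  match (PySem.List.pyGet? wire (-1)).getD [0, 0] with
  | [x_move, y_move] => wire ++ [[x_move + x_direct, y_move + y_direct]]
  | _ => wire ++ [[x_direct, y_direct]]

def create_wire (wire_directions : List (String × Int)) : List (List Int) :=
  wire_directions.foldl pvStepA [[0, 0]]

-- ===== PORT B =====
-- B's translation of one vertex by (dx, dy) (the comprehension destructures [x, y];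
-- the fallback branch is a totality guard, unreachable: every vertex has two coordinates)
def pvShift (dx dy : Int) (v : List Int) : List Int :=
  match v with
  | [x, y] => [x + dx, y + dy]
  | w => w

def create_wire_alt (wire_directions : List (String × Int)) : List (List Int) :=
  match wire_directions with
  | [] => [[0, 0]]
  | (move, dist) :: rest =>
    let d := (pvDirections.get? move).getD (0, 0)
    let dx := d.1 * dist
    let dy := d.2 * dist
    [0, 0] :: (create_wire_alt rest).map (pvShift dx dy)

-- ===== PRECONDITION & SPEC =====
-- Pre_ excludes exactly the inputs where A raises KeyError: a move whose letter is not R/U/L/D.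
def Pre_create_wire (wire_directions : List (String × Int)) : Prop :=
  ∀ m ∈ wire_directions, m.1 = "R" ∨ m.1 = "U" ∨ m.1 = "L" ∨ m.1 = "D"
instance (wire_directions : List (String × Int)) : Decidable (Pre_create_wire wire_directions) := by
  unfold Pre_create_wire; infer_instance

def pvWitness_create_wire : (List (String × Int)) := [("R", 2), ("U", 3), ("D", -1)]

def Spec_create_wire (wire_directions : List (String × Int)) (out : List (List Int)) : Prop := out = create_wire_alt wire_directions
instance (wire_directions : List (String × Int)) (out : List (List Int)) : Decidable (Spec_create_wire wire_directions out) := by unfold Spec_create_wire; infer_instance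

-- ===== CLAIM (what is proved, stated in full; the proofs are below) =====
def Claim_equal_create_wire : Prop := ∀ (wire_directions : List (String × Int)), Dom_create_wire wire_directions → Pre_create_wire wire_directions → Spec_create_wire wire_directions (create_wire wire_directions)

-- ===== LEMMAS AND PROOFS =====

-- every vertex B produces is a two-element list
theorem alt_shape (moves : List (String × Int)) :
    ∀ v ∈ create_wire_alt moves, ∃ a b : Int, v = [a, b] := by
  induction moves with
  | nil => intro v hv; simp [create_wire_alt] at hv; exact ⟨0, 0, hv⟩
  | cons m rest ih =>
    intro v hv
    obtain ⟨mv, dist⟩ := m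
    simp only [create_wire_alt, List.mem_cons, List.mem_map] at hv
    rcases hv with h | ⟨w, hw, rfl⟩
    · exact ⟨0, 0, h⟩
    · obtain ⟨a, b, rfl⟩ := ih w hw
      exact ⟨a + _, b + _, rfl⟩

-- two translations compose into one on B's vertices
theorem map_shift_shift (moves : List (String × Int)) (x y dx dy : Int) :
    ((create_wire_alt moves).map (pvShift dx dy)).map (pvShift x y) =
      (create_wire_alt moves).map (pvShift (x + dx) (y + dy)) := by
  rw [List.map_map]
  apply List.map_congr_left
  intro v hv
  obtain ⟨a, b, rfl⟩ := alt_shape moves v hv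
  simp [pvShift]
  constructor <;> ring

-- A's loop started on any wire ending in [x, y] appends B's wire translated by (x, y) (head dropped)
theorem foldA_eq_alt (moves : List (String × Int)) :
    ∀ (pre : List (List Int)) (x y : Int),
      moves.foldl pvStepA (pre ++ [[x, y]]) =
        pre ++ (create_wire_alt moves).map (pvShift x y) := by
  induction moves with
  | nil => intro pre x y; simp [create_wire_alt, pvShift]
  | cons m rest ih =>
    intro pre x y
    obtain ⟨mv, dist⟩ := m
    have hstep : pvStepA (pre ++ [[x, y]]) (mv, dist) =
        (pre ++ [[x, y]]) ++
          [[x + ((pvDirections.get? mv).getD (0, 0)).1 * dist,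
            y + ((pvDirections.get? mv).getD (0, 0)).2 * dist]] := by
      simp [pvStepA, PySem.List.pyGet?_neg_one_append_singleton]
    rw [List.foldl_cons, hstep, ih]
    simp only [create_wire_alt, List.map_cons, map_shift_shift]
    simp [pvShift]

-- ===== VERDICT (by name: the statement is the Claim_ definition above) =====
theorem create_wire_spec : Claim_equal_create_wire := by
  intro wds _ _
  unfold Spec_create_wire create_wire
  have := foldA_eq_alt wds [] 0 0
  simp only [List.nil_append] at this
  rw [this]
  have hid : ∀ v ∈ create_wire_alt wds, pvShift 0 0 v = id v := by
    intro v hv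
    obtain ⟨a, b, rfl⟩ := alt_shape wds v hv
    simp [pvShift]
  rw [List.map_congr_left hid, List.map_id]
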